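-- pv_equiv track=rewrite | github.com/TheBigCodeNoob/PyroCast | spread_model/01_fetch_fire_perimeters.py | sanitize_fire_id
-- ===== SOURCE A (Python) =====
-- def sanitize_fire_id(fire_id):
--     """
--     Sanitize fire ID to remove invalid filename characters.
--     Removes newlines, tabs, and other problematic characters.
--     """
--     if not fire_id:
--         return fire_id
--
--     # Convert to string and remove problematic characters
--     fire_id_str = str(fire_id)
--     # Remove newlines, carriage returns, tabs
--     fire_id_str = fire_id_str.replace('\n', '').replace('\r', '').replace('\t', '')
--     # Remove other invalid filename characters
--     invalid_chars = '<>:"|?*'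
--     for char in invalid_chars:
--         fire_id_str = fire_id_str.replace(char, '_')
--     # Remove leading/trailing whitespace
--     fire_id_str = fire_id_str.strip()
--
--     return fire_id_str
-- ===== SOURCE B (Python) =====
-- def sanitize_fire_id(fire_id):
--     """Single-pass re-implementation: one traversal instead of ten .replace rescans."""
--     if not fire_id:
--         return fire_id
--     fire_id_str = str(fire_id)
--     return ''.join(
--         '_' if c in '<>:"|?*' else c
--         for c in fire_id_str
--         if c not in '\n\r\t'
--     ).strip()
-- ===== Notes on version B (the rewrite author's own statement) =====
-- stated objective: alternative
-- what changed: The ten sequential full-string .replace passes are fused into a single character-by-character traversal (filter the whitespace controls out, map the invalid filename characters to '_', join once), followed by the same strip.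
import Mathlib
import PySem

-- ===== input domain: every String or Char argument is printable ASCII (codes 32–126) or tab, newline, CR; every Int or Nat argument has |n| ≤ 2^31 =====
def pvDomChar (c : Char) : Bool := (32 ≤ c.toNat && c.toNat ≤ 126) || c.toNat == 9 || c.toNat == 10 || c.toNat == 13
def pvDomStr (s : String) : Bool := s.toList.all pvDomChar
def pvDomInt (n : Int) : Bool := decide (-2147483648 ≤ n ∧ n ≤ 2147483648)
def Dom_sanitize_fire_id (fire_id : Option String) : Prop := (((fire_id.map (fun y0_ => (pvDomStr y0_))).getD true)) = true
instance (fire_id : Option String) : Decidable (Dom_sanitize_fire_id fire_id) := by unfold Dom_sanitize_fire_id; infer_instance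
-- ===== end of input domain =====

-- B fuses A's ten sequential full-string .replace passes into one character traversal
-- (drop \n\r\t, map <>:"|?* to '_', join, then strip); same return value, alternative structure.


-- ===== PORT A =====
def sanitize_fire_id (fire_id : Option String) : Option String :=
  match fire_id with
  | none => none                                    -- 'if not fire_id: return fire_id' (None case)
  | some s =>
    if s = "" then some s                           -- 'if not fire_id: return fire_id' (empty-string case)
    else
      -- fire_id_str = str(fire_id): the argument is already a string
      -- fire_id_str.replace('\n','').replace('\r','').replace('\t','')
      let s1 := PySem.Str.replace (PySem.Str.replace (PySem.Str.replace s "\n" "") "\r" "") "\t" ""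
      -- for char in '<>:"|?*': fire_id_str = fire_id_str.replace(char, '_')
      let s2 := ["<", ">", ":", "\"", "|", "?", "*"].foldl
        (fun acc ch => PySem.Str.replace acc ch "_") s1
      some (PySem.Str.strip s2)

-- ===== PORT B =====
def sanitize_fire_id_alt (fire_id : Option String) : Option String :=
  match fire_id with
  | none => none
  | some s =>
    if s = "" then some s
    else
      -- ''.join('_' if c in '<>:"|?*' else c for c in fire_id_str if c not in '\n\r\t').strip()
      let cs := s.toList.filterMap (fun c =>
        if c ∈ ['\n', '\r', '\t'] then none
        else if c ∈ ['<', '>', ':', '"', '|', '?', '*'] then some '_'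
        else some c)
      some (PySem.Str.strip (String.ofList cs))

-- ===== PRECONDITION & SPEC =====
def Spec_sanitize_fire_id (fire_id : Option String) (out : Option String) : Prop := out = sanitize_fire_id_alt fire_id
instance (fire_id : Option String) (out : Option String) : Decidable (Spec_sanitize_fire_id fire_id out) := by unfold Spec_sanitize_fire_id; infer_instance

-- ===== CLAIM (what is proved, stated in full; the proofs are below) =====
def Claim_equal_sanitize_fire_id : Prop := ∀ (fire_id : Option String), Dom_sanitize_fire_id fire_id → Spec_sanitize_fire_id fire_id (sanitize_fire_id fire_id)

-- ===== LEMMAS AND PROOFS =====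

-- replace's worker with a single-character pattern is a flatMap over the characters
lemma go_single (o : Char) (new : List Char) :
    ∀ (l acc : List Char) (fuel : Nat), l.length ≤ fuel →
      PySem.Chars.replace.go [o] new fuel l acc
        = acc.reverse ++ l.flatMap (fun c => if c = o then new else [c]) := by
  intro l
  induction l with
  | nil => intro acc fuel _; cases fuel <;> simp [PySem.Chars.replace.go]
  | cons c t ih =>
    intro acc fuel hf
    cases fuel with
    | zero => simp at hf
    | succ f =>
      simp only [PySem.Chars.replace.go]
      by_cases h : c = o
      · subst h; simp [List.isPrefixOf, ih _ f (by simpa using hf)]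
      · have hpre : [o].isPrefixOf (c :: t) = false := by
          simp [List.isPrefixOf, BEq.beq]
          intro hc; exact absurd hc.symm h
        simp [hpre, ih _ f (by simpa using hf), h]

lemma replace_single (cs : List Char) (o : Char) (new : List Char) :
    PySem.Chars.replace cs [o] new = cs.flatMap (fun c => if c = o then new else [c]) := by
  simp [PySem.Chars.replace, go_single o new cs [] cs.length le_rfl]

-- A's whole replace chain, read off its character list, equals B's single filterMap
lemma chain_eq_filterMap (cs : List Char) :
    (["<", ">", ":", "\"", "|", "?", "*"].foldl
        (fun acc ch => PySem.Str.replace acc ch "_")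
        (PySem.Str.replace (PySem.Str.replace (PySem.Str.replace (String.ofList cs) "\n" "") "\r" "") "\t" "")).toList
    = cs.filterMap (fun c =>
        if c ∈ ['\n', '\r', '\t'] then none
        else if c ∈ ['<', '>', ':', '"', '|', '?', '*'] then some '_'
        else some c) := by
  have h1 : "\n".toList = ['\n'] := by decide
  have h2 : "\r".toList = ['\r'] := by decide
  have h3 : "\t".toList = ['\t'] := by decide
  have h4 : "".toList = [] := by decide
  have h5 : "<".toList = ['<'] := by decide
  have h6 : ">".toList = ['>'] := by decide
  have h7 : ":".toList = [':'] := by decide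
  have h8 : "\"".toList = ['"'] := by decide
  have h9 : "|".toList = ['|'] := by decide
  have h10 : "?".toList = ['?'] := by decide
  have h11 : "*".toList = ['*'] := by decide
  have h12 : "_".toList = ['_'] := by decide
  simp only [List.foldl_cons, List.foldl_nil, PySem.Str.toList_replace, String.toList_ofList,
    h1, h2, h3, h4, h5, h6, h7, h8, h9, h10, h11, h12, replace_single, List.flatMap_assoc]
  rw [List.filterMap_eq_flatMap_toList]
  apply List.flatMap_congr
  intro c _
  rcases Decidable.em (c = '\n') with h | h; · simp [h]
  rcases Decidable.em (c = '\r') with h' | h'; · simp [h']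
  rcases Decidable.em (c = '\t') with h'' | h''; · simp [h'']
  by_cases hc : c ∈ ['<', '>', ':', '"', '|', '?', '*']
  · fin_cases hc <;> simp
  · simp only [List.mem_cons, List.not_mem_nil, or_false] at hc
    push_neg at hc
    obtain ⟨a1, a2, a3, a4, a5, a6, a7⟩ := hc
    simp [h, h', h'', a1, a2, a3, a4, a5, a6, a7]

-- ===== VERDICT (by name: the statement is the Claim_ definition above) =====
theorem sanitize_fire_id_spec : Claim_equal_sanitize_fire_id := by
  intro fire_id _
  cases fire_id with
  | none => rfl
  | some s =>
    simp only [Spec_sanitize_fire_id, sanitize_fire_id, sanitize_fire_id_alt]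
    by_cases hs : s = ""
    · rw [if_pos hs, if_pos hs]
    · rw [if_neg hs, if_neg hs]
      have h := chain_eq_filterMap s.toList
      rw [String.ofList_toList] at h
      exact congrArg (fun t => some (PySem.Str.strip t))
        (String.toList_inj.mp (h.trans (String.toList_ofList).symm))
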